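-- pv_equiv track=rewrite | github.com/tanmey007/vbe_app | src/vbe_fci/vbe.py | vbe_gen
-- ===== SOURCE A (Python) =====
-- def vbe_gen(x):
--     ls = []
--     while x:
--         q = x % (2 ** 7)
--         ls.append(q)
--         x = x // (2 ** 7)
--     ls.reverse()
--     return ls
-- ===== SOURCE B (Python) =====
-- def vbe_gen(x):
--     n = (x.bit_length() + 6) // 7
--     return [(x >> (7 * (n - 1 - i))) & 127 for i in range(n)]
-- ===== Notes on version B (the rewrite author's own statement) =====
-- stated objective: simpler
-- what changed: B computes the digit count up front from bit_length and emits the base-128 digits MSB-first in one forward pass with shifts and masks, instead of A's divide-and-append loop followed by a reverse.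
import Mathlib
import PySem

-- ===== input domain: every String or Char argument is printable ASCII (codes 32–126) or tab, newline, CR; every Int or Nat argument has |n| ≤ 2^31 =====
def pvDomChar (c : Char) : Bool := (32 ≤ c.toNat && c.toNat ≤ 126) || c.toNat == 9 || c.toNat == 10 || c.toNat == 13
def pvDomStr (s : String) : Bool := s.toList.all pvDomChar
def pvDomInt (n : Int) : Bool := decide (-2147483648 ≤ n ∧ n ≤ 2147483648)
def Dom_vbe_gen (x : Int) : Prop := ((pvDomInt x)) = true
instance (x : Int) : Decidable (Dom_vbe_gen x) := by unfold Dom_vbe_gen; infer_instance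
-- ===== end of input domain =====

-- B replaces A's divide/append loop + reverse by computing the digit count from bit_length
-- and emitting the base-128 digits MSB-first in one forward shift-and-mask pass (objective: simpler).

-- ===== PORT A =====
-- the while loop of A; the `x ≤ 0` test exits at x = 0 exactly as Python's `while x:` does
-- (for x < 0 Python diverges — those inputs are outside Pre_; the guard only makes the port total)
def vbe_gen_loop (x : Int) (ls : List Int) : List Int :=
  if h : x ≤ 0 then ls
  else vbe_gen_loop (PySem.Int.floordiv x 128) (ls ++ [PySem.Int.mod x 128])
termination_by x.toNat
decreasing_by
  have h0 : (0:Int) < x := by omega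
  have : PySem.Int.floordiv x 128 = x / 128 := PySem.Int.floordiv_eq_ediv_of_pos (by omega)
  rw [this]
  omega

def vbe_gen (x : Int) : List Int :=
  (vbe_gen_loop x []).reverse

-- ===== PORT B =====
-- Python's int.bit_length for a nonnegative argument
def pyBitLength (m : Nat) : Nat := if m = 0 then 0 else m.log2 + 1

-- exact for x ≥ 0 (= Pre_); shifts/masks are done on x.toNat
def vbe_gen_alt (x : Int) : List Int :=
  let m := x.toNat
  let n := (pyBitLength m + 6) / 7
  (List.range n).map (fun i => (((m >>> (7 * (n - 1 - i))) &&& 127 : Nat) : Int))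

-- ===== PRECONDITION & SPEC =====
-- Pre_ excludes negative x, on which A's while loop never terminates (Python hangs)
def Pre_vbe_gen (x : Int) : Prop := 0 ≤ x
instance (x : Int) : Decidable (Pre_vbe_gen x) := by unfold Pre_vbe_gen; infer_instance
def pvWitness_vbe_gen : Int := (300)

def Spec_vbe_gen (x : Int) (out : List Int) : Prop := out = vbe_gen_alt x
instance (x : Int) (out : List Int) : Decidable (Spec_vbe_gen x out) := by unfold Spec_vbe_gen; infer_instance

-- ===== CLAIM (what is proved, stated in full; the proofs are below) =====
def Claim_equal_vbe_gen : Prop := ∀ (x : Int), Dom_vbe_gen x → Pre_vbe_gen x → Spec_vbe_gen x (vbe_gen x)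

-- ===== LEMMAS AND PROOFS =====

-- the loop only appends to its accumulator (strong induction on an upper bound of x.toNat)
theorem vbe_gen_loop_acc_aux : ∀ (n : Nat) (x : Int), x.toNat ≤ n →
    ∀ ls, vbe_gen_loop x ls = ls ++ vbe_gen_loop x [] := by
  intro n
  induction n with
  | zero =>
    intro x hx ls
    have hx0 : x ≤ 0 := by omega
    rw [vbe_gen_loop, dif_pos hx0, vbe_gen_loop, dif_pos hx0, List.append_nil]
  | succ n ih =>
    intro x hx ls
    by_cases h : x ≤ 0
    · rw [vbe_gen_loop, dif_pos h, vbe_gen_loop, dif_pos h, List.append_nil]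
    · have hd : PySem.Int.floordiv x 128 = x / 128 := PySem.Int.floordiv_eq_ediv_of_pos (by omega)
      have hlt : (PySem.Int.floordiv x 128).toNat ≤ n := by rw [hd]; omega
      rw [vbe_gen_loop, dif_neg h, ih _ hlt,
          show vbe_gen_loop x [] = vbe_gen_loop (PySem.Int.floordiv x 128) ([] ++ [PySem.Int.mod x 128]) from by
            rw [vbe_gen_loop, dif_neg h],
          List.nil_append,
          ih (PySem.Int.floordiv x 128) hlt [PySem.Int.mod x 128]]
      simp

theorem vbe_gen_loop_acc (x : Int) (ls : List Int) :
    vbe_gen_loop x ls = ls ++ vbe_gen_loop x [] :=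
  vbe_gen_loop_acc_aux x.toNat x le_rfl ls

-- the Nat form of B's body
def altNat (m : Nat) : List Int :=
  (List.range ((pyBitLength m + 6) / 7)).map
    (fun i => (((m >>> (7 * ((pyBitLength m + 6) / 7 - 1 - i))) &&& 127 : Nat) : Int))

theorem vbe_gen_alt_eq (x : Int) : vbe_gen_alt x = altNat x.toNat := rfl

theorem log2_div128 (m : Nat) (h : 128 ≤ m) : (m / 128).log2 = m.log2 - 7 := by
  have e : m / 128 = m / 2 / 2 / 2 / 2 / 2 / 2 / 2 := by
    simp [Nat.div_div_eq_div_mul]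
  rw [e]
  rw [Nat.log2_def m, Nat.log2_def (m/2), Nat.log2_def (m/2/2), Nat.log2_def (m/2/2/2),
      Nat.log2_def (m/2/2/2/2), Nat.log2_def (m/2/2/2/2/2), Nat.log2_def (m/2/2/2/2/2/2)]
  simp only [show 2 ≤ m from by omega, show 2 ≤ m/2 from by omega,
    show 2 ≤ m/2/2 from by omega, show 2 ≤ m/2/2/2 from by omega,
    show 2 ≤ m/2/2/2/2 from by omega, show 2 ≤ m/2/2/2/2/2 from by omega,
    show 2 ≤ m/2/2/2/2/2/2 from by omega, if_true]
  omega

-- digit count of m/128 is one less than that of m, for m > 0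
theorem ndigits_div128 (m : Nat) (h : 0 < m) :
    (pyBitLength (m / 128) + 6) / 7 + 1 = (pyBitLength m + 6) / 7 := by
  by_cases hm : m < 128
  · have h0 : m / 128 = 0 := Nat.div_eq_of_lt hm
    have hl : m.log2 < 7 := (Nat.log2_lt (by omega)).mpr (by omega)
    simp [pyBitLength, h0, Nat.ne_of_gt h]
    omega
  · have h128 : 128 ≤ m := by omega
    have hq : 0 < m / 128 := Nat.div_pos h128 (by norm_num)
    have hl : 7 ≤ m.log2 := by
      have := (Nat.le_log2 (by omega)).mpr (show 2^7 ≤ m from h128)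
      omega
    simp [pyBitLength, Nat.ne_of_gt h, Nat.ne_of_gt hq, log2_div128 m h128]
    omega

-- B's recurrence: peel off the least-significant digit
theorem altNat_step (m : Nat) (h : 0 < m) :
    altNat m = altNat (m / 128) ++ [((m % 128 : Nat) : Int)] := by
  have hn := ndigits_div128 m h
  set k := (pyBitLength (m / 128) + 6) / 7 with hk
  have hnm : (pyBitLength m + 6) / 7 = k + 1 := hn.symm
  unfold altNat
  rw [hnm, List.range_succ, List.map_append]
  congr 1
  · apply List.map_congr_left
    intro i hi
    have hik : i < k := List.mem_range.mp hi
    have hsh : 7 * (k + 1 - 1 - i) = 7 * (k - 1 - i) + 7 := by omega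
    rw [hsh]
    have : m >>> (7 * (k - 1 - i) + 7) = (m / 128) >>> (7 * (k - 1 - i)) := by
      rw [Nat.shiftRight_eq_div_pow, Nat.shiftRight_eq_div_pow, Nat.div_div_eq_div_mul]
      congr 1
      rw [pow_add]
      ring
    rw [this, ← hk]
  · simp [Nat.and_two_pow_sub_one_eq_mod m 7]

-- main induction: the reversed loop output equals B's digits
theorem loop_eq_altNat (m : Nat) :
    (vbe_gen_loop (m : Int) []).reverse = altNat m := by
  by_cases h : m = 0
  · subst h
    simp [vbe_gen_loop, altNat, pyBitLength]
  · have hpos : (0:Int) < (m : Int) := by exact_mod_cast Nat.pos_of_ne_zero h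
    rw [vbe_gen_loop, dif_neg (by omega)]
    rw [vbe_gen_loop_acc]
    have hdiv : PySem.Int.floordiv (m : Int) 128 = ((m / 128 : Nat) : Int) := by
      exact_mod_cast PySem.Int.floordiv_natCast m 128
    have hmod : PySem.Int.mod (m : Int) 128 = ((m % 128 : Nat) : Int) := by
      exact_mod_cast PySem.Int.mod_natCast m 128
    rw [hdiv, hmod, List.reverse_append]
    rw [loop_eq_altNat (m / 128)]
    rw [altNat_step m (Nat.pos_of_ne_zero h)]
    simp
termination_by m
decreasing_by
  exact Nat.div_lt_self (Nat.pos_of_ne_zero h) (by norm_num)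

-- ===== VERDICT (by name: the statement is the Claim_ definition above) =====
theorem vbe_gen_spec : Claim_equal_vbe_gen := by
  intro x _ hpre
  have hx : x = ((x.toNat : Nat) : Int) := by
    have : (0:Int) ≤ x := hpre
    omega
  unfold Spec_vbe_gen vbe_gen
  rw [vbe_gen_alt_eq, hx, loop_eq_altNat, Int.toNat_natCast]
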